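-- pv_equiv track=rewrite | github.com/Neob1844/sost-core | scripts/useful_compute/handlers/heavy_pgm_replacement_screen.py | _slice_pool
-- ===== SOURCE A (Python) =====
-- from typing import Dict, List, Tuple
--
-- def _slice_pool(pool: List[str], slice_index: int, slice_size: int) -> List[str]:
--     n = len(pool)
--     if n == 0 or slice_size <= 0:
--         return []
--     start = (slice_index * slice_size) % n
--     out = []
--     for i in range(slice_size):
--         out.append(pool[(start + i) % n])
--     return out
-- ===== SOURCE B (Python) =====
-- def _slice_pool(pool, slice_index, slice_size):
--     n = len(pool)
--     if n == 0 or slice_size <= 0: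
--         return []
--     start = (slice_index * slice_size) % n
--     rotated = pool[start:] + pool[:start]
--     return (rotated * (slice_size // n + 1))[:slice_size]
-- ===== Notes on version B (the rewrite author's own statement) =====
-- stated objective: simpler
-- what changed: replaces the per-element modular-index loop with a single list rotation (pool[start:]+pool[:start]) repeated and truncated to slice_size by list-level slicing
import Mathlib
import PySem

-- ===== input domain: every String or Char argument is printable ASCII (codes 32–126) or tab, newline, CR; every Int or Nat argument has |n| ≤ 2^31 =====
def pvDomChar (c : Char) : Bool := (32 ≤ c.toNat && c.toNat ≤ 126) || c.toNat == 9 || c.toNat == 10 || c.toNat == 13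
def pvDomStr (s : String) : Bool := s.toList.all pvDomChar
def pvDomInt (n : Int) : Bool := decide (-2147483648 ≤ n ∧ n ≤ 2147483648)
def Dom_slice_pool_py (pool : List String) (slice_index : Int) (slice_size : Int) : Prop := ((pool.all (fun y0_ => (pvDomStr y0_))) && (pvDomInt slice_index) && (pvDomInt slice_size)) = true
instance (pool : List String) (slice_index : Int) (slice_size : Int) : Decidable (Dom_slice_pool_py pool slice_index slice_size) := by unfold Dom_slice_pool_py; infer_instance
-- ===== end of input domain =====

-- B replaces A's per-element modular-index loop with one list rotation, repeated and truncated (simpler).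

-- ===== PORT A =====
-- literal port of A: the loop index (start+i) % n always lies in [0, n), so pyGetD with default "" is exact
def slice_pool_py (pool : List String) (slice_index : Int) (slice_size : Int) : List String :=
  let n : Int := (pool.length : Int)
  if n = 0 ∨ slice_size ≤ 0 then []
  else
    let start := PySem.Int.mod (slice_index * slice_size) n
    (PySem.List.pyRange 0 slice_size 1).foldl
      (fun out i => out ++ [PySem.List.pyGetD pool (PySem.Int.mod (start + i) n) ""]) []

-- ===== PORT B =====
-- literal port of B: pool[start:] + pool[:start], then list repetition (* k = flatten of replicate) and [:slice_size]
def slice_pool_py_alt (pool : List String) (slice_index : Int) (slice_size : Int) : List String :=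
  let n : Int := (pool.length : Int)
  if n = 0 ∨ slice_size ≤ 0 then []
  else
    let start := PySem.Int.mod (slice_index * slice_size) n
    let rotated := PySem.List.slice pool (some start) none ++ PySem.List.slice pool none (some start)
    PySem.List.slice ((List.replicate (PySem.Int.floordiv slice_size n + 1).toNat rotated).flatten)
      none (some slice_size)

-- ===== PRECONDITION & SPEC =====
def Spec_slice_pool_py (pool : List String) (slice_index : Int) (slice_size : Int) (out : List String) : Prop := out = slice_pool_py_alt pool slice_index slice_size
instance (pool : List String) (slice_index : Int) (slice_size : Int) (out : List String) : Decidable (Spec_slice_pool_py pool slice_index slice_size out) := by unfold Spec_slice_pool_py; infer_instance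

-- ===== CLAIM (what is proved, stated in full; the proofs are below) =====
def Claim_equal_slice_pool_py : Prop := ∀ (pool : List String) (slice_index : Int) (slice_size : Int), Dom_slice_pool_py pool slice_index slice_size → Spec_slice_pool_py pool slice_index slice_size (slice_pool_py pool slice_index slice_size)

-- ===== LEMMAS AND PROOFS =====

-- indexing into k copies of a list is indexing into the list modulo its length
theorem flatten_replicate_getElem? {α : Type} (K : Nat) (l : List α) (k : Nat)
    (h : k < K * l.length) : (List.replicate K l).flatten[k]? = l[k % l.length]? := by
  induction K generalizing k with
  | zero => omega
  | succ K ih =>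
    rw [Nat.succ_mul] at h
    simp only [List.replicate_succ, List.flatten_cons]
    by_cases hk : k < l.length
    · rw [List.getElem?_append_left hk, Nat.mod_eq_of_lt hk]
    · rw [Nat.not_lt] at hk
      rw [List.getElem?_append_right hk, ih (k - l.length) (by omega),
        Nat.mod_eq_sub_mod hk]

theorem slice_pool_py_eq_alt (pool : List String) (slice_index slice_size : Int) :
    slice_pool_py pool slice_index slice_size = slice_pool_py_alt pool slice_index slice_size := by
  by_cases hc : (pool.length : Int) = 0 ∨ slice_size ≤ 0
  · simp only [slice_pool_py, slice_pool_py_alt, if_pos hc]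
  · have hn0 : (pool.length : Int) ≠ 0 := fun h => hc (Or.inl h)
    have hs : 0 < slice_size := by
      rcases lt_or_ge 0 slice_size with h | h
      · exact h
      · exact absurd (Or.inr (by omega)) hc
    have hn : 0 < pool.length := by omega
    set nn := pool.length with hnn
    set s := slice_size.toNat with hstn
    have hss : slice_size = (s : Int) := by omega
    have hmodpos : PySem.Int.mod (slice_index * slice_size) (nn : Int)
        = (slice_index * slice_size) % (nn : Int) :=
      PySem.Int.mod_eq_emod_of_pos (by exact_mod_cast hn)
    set startI := PySem.Int.mod (slice_index * slice_size) (nn : Int) with hstart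
    have hst0 : 0 ≤ startI := by rw [hmodpos]; exact Int.emod_nonneg _ hn0
    have hstlt : startI < (nn : Int) := by
      rw [hmodpos]; exact Int.emod_lt_of_pos _ (by exact_mod_cast hn)
    set st := startI.toNat with hstt
    have hstI : startI = (st : Int) := by omega
    have hstnn : st < nn := by omega
    -- A as a map over List.range s
    have hidx : ∀ k : Nat, PySem.List.pyGetD pool
        (PySem.Int.mod (startI + (0 + (k : Int))) (nn : Int)) "" = pool.getD ((st + k) % nn) "" := by
      intro k
      rw [hstI, zero_add,
        show ((st : Int) + (k : Int)) = ((st + k : Nat) : Int) by push_cast; ring,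
        PySem.Int.mod_natCast, PySem.List.pyGetD_natCast]
    have hA : slice_pool_py pool slice_index slice_size
        = (List.range s).map (fun k => pool.getD ((st + k) % nn) "") := by
      simp only [slice_pool_py]
      rw [if_neg hc, PySem.List.foldl_append_singleton_eq_map, PySem.List.pyRange_one]
      simp only [List.nil_append, List.map_map, sub_zero]
      refine List.map_congr_left (fun k hk => ?_)
      exact hidx k
    -- B as take of flattened replicate of the rotation
    have hK : (PySem.Int.floordiv slice_size (nn : Int) + 1).toNat = s / nn + 1 := by
      have h1 : PySem.Int.floordiv slice_size (nn : Int) = slice_size / (nn : Int) :=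
        PySem.Int.floordiv_eq_ediv_of_pos (by exact_mod_cast hn)
      have h2 : slice_size / (nn : Int) = ((s / nn : Nat) : Int) := by rw [hss]; norm_cast
      rw [h1, h2,
        show ((s / nn : Nat) : Int) + 1 = ((s / nn + 1 : Nat) : Int) by push_cast; ring,
        Int.toNat_natCast]
    have hrot : PySem.List.slice pool (some startI) none ++ PySem.List.slice pool none (some startI)
        = pool.rotate st := by
      rw [PySem.List.slice_from _ hst0, PySem.List.slice_to _ hst0,
        List.rotate_eq_drop_append_take (by omega)]
    have hB : slice_pool_py_alt pool slice_index slice_size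
        = ((List.replicate (s / nn + 1) (pool.rotate st)).flatten).take s := by
      simp only [slice_pool_py_alt]
      rw [if_neg hc, ← hstart, hrot, hK, PySem.List.slice_to _ (le_of_lt hs), hss,
        Int.toNat_natCast]
    have hlen : s ≤ (s / nn + 1) * nn := by
      have h1 : (s / nn + 1) * nn = nn * (s / nn) + nn := by ring
      have h2 := Nat.div_add_mod s nn
      have h3 := Nat.mod_lt s hn
      omega
    rw [hA, hB]
    apply List.ext_getElem?
    intro k
    by_cases hks : k < s
    · rw [List.getElem?_map, List.getElem?_range hks,
        List.getElem?_take_of_lt hks,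
        flatten_replicate_getElem? _ _ _
          (by rw [List.length_rotate]; exact lt_of_lt_of_le hks hlen),
        List.length_rotate,
        List.getElem?_rotate (Nat.mod_lt k hn),
        Nat.mod_add_mod, Nat.add_comm k st]
      have hlt : (st + k) % nn < pool.length := Nat.mod_lt _ hn
      rw [List.getElem?_eq_getElem hlt]
      simp only [Option.map_some]
      rw [List.getD_eq_getElem pool "" hlt]
    · rw [Nat.not_lt] at hks
      rw [List.getElem?_eq_none (by simpa using hks),
        List.getElem?_eq_none (by rw [List.length_take]; omega)]

-- ===== VERDICT (by name: the statement is the Claim_ definition above) =====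
theorem slice_pool_py_spec : Claim_equal_slice_pool_py := by
  intro pool slice_index slice_size _
  exact slice_pool_py_eq_alt pool slice_index slice_size
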